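-- pv_equiv track=rewrite | github.com/rhargreaves/dsa-sandbox | solutions/two_pointers/similar_strs/similar.py | indicesToRemove
-- ===== SOURCE A (Python) =====
-- def indicesToRemove(str1, str2):
--     indices = []
--     for i in range(len(str1)):
--         if str1[:i] + str1[i+1:] == str2:
--             indices.append(i)
--
--     if not indices:
--         return [-1]
--     return indices
-- ===== SOURCE B (Python) =====
-- def indicesToRemove(str1, str2):
--     # Two-pointer: removal index i works iff i <= longest common prefix
--     # and i >= len(str1)-1-longest common suffix; valid indices form a contiguous range.
--     n1, n2 = len(str1), len(str2)
--     if n1 != n2 + 1: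
--         return [-1]
--     p = 0
--     while p < n2 and str1[p] == str2[p]:
--         p += 1
--     s = 0
--     while s < n2 and str1[n1 - 1 - s] == str2[n2 - 1 - s]:
--         s += 1
--     lo, hi = n1 - 1 - s, p
--     return list(range(lo, hi + 1)) if lo <= hi else [-1]
-- ===== Notes on version B (the rewrite author's own statement) =====
-- stated objective: faster
-- what changed: A rebuilds and compares the whole deletion string for every index (quadratic); B computes the longest common prefix and suffix with two pointer scans and returns the resulting contiguous index range directly.
import Mathlib
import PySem

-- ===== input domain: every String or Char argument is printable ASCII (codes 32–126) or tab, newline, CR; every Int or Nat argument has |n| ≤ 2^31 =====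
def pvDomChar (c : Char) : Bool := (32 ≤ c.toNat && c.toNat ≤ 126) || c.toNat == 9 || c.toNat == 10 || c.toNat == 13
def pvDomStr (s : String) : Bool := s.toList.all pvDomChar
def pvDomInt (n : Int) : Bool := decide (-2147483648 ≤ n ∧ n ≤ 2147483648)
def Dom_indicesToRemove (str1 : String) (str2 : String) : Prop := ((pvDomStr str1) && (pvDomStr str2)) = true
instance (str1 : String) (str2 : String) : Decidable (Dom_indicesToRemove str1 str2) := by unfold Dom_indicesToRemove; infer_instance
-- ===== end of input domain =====

-- B replaces A's quadratic scan (rebuild and compare a deletion for every index) by a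
-- two-pointer longest-common-prefix/suffix computation: valid removal indices form one
-- contiguous range. Objective: faster (asymptotic, O(n^2) → O(n)).

-- ===== PORT A =====
def indicesToRemove (str1 : String) (str2 : String) : List Int :=
  let l1 := str1.toList
  let indices := (List.range l1.length).foldl (fun (acc : List Int) (i : Nat) =>
      if PySem.List.slice l1 none (some (i : Int)) ++ PySem.List.slice l1 (some ((i : Int) + 1)) none == str2.toList
      then acc ++ [(i : Int)] else acc) ([] : List Int)
  if indices = [] then [-1] else indices

-- ===== PORT B =====
-- common-prefix length: the two advancing pointers of B's while loops
def pvLcp : List Char → List Char → Nat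
  | a :: as, b :: bs => if a = b then pvLcp as bs + 1 else 0
  | _, _ => 0

def indicesToRemove_alt (str1 : String) (str2 : String) : List Int :=
  let l1 := str1.toList
  let l2 := str2.toList
  if l1.length ≠ l2.length + 1 then [-1]
  else
    let p := pvLcp l1 l2
    let s := pvLcp l1.reverse l2.reverse
    let lo := l1.length - 1 - s
    if lo ≤ p then (List.range' lo (p + 1 - lo)).map (fun (i : Nat) => (i : Int)) else [-1]

-- ===== PRECONDITION & SPEC =====
def Spec_indicesToRemove (str1 : String) (str2 : String) (out : List Int) : Prop := out = indicesToRemove_alt str1 str2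
instance (str1 : String) (str2 : String) (out : List Int) : Decidable (Spec_indicesToRemove str1 str2 out) := by unfold Spec_indicesToRemove; infer_instance

-- ===== CLAIM (what is proved, stated in full; the proofs are below) =====
def Claim_equal_indicesToRemove : Prop := ∀ (str1 : String) (str2 : String), Dom_indicesToRemove str1 str2 → Spec_indicesToRemove str1 str2 (indicesToRemove str1 str2)

-- ===== LEMMAS AND PROOFS =====

theorem pvLcp_le_right (a b : List Char) : pvLcp a b ≤ b.length := by
  induction a generalizing b with
  | nil => simp [pvLcp]
  | cons x xs ih =>
    cases b with
    | nil => simp [pvLcp]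
    | cons y ys =>
      simp only [pvLcp]
      split_ifs
      · simpa using ih ys
      · simp

theorem take_eq_of_le_pvLcp (a b : List Char) (k : Nat) (h : k ≤ pvLcp a b) :
    a.take k = b.take k := by
  induction a generalizing b k with
  | nil =>
    simp [pvLcp] at h
    simp [h]
  | cons x xs ih =>
    cases b with
    | nil => simp [pvLcp] at h; simp [h]
    | cons y ys =>
      simp only [pvLcp] at h
      split_ifs at h with hxy
      · cases k with
        | zero => simp
        | succ k' => simp [hxy, List.take_succ_cons, ih ys k' (by omega)]
      · have hk : k = 0 := by omega
        subst hk; simp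

theorem le_pvLcp_of_take_eq (a b : List Char) (k : Nat) (ha : k ≤ a.length)
    (hb : k ≤ b.length) (h : a.take k = b.take k) : k ≤ pvLcp a b := by
  induction a generalizing b k with
  | nil => simp at ha; omega
  | cons x xs ih =>
    cases k with
    | zero => omega
    | succ k' =>
      cases b with
      | nil => simp at hb
      | cons y ys =>
        simp only [List.take_succ_cons, List.cons.injEq] at h
        simp only [pvLcp, h.1, if_pos]
        have := ih ys k' (by simpa using ha) (by simpa using hb) h.2
        omega

theorem filter_range_interval (lo hi n : Nat) :
    (List.range n).filter (fun i => decide (lo ≤ i ∧ i ≤ hi)) =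
      List.range' lo (min (hi + 1) n - lo) := by
  induction n with
  | zero => simp
  | succ n ih =>
    rw [List.range_succ, List.filter_append, ih]
    by_cases h1 : n ≤ hi
    · by_cases h2 : lo ≤ n
      · have hmin : min (hi + 1) n = n := by omega
        have hmin' : min (hi + 1) (n + 1) = n + 1 := by omega
        have hlen : n + 1 - lo = (n - lo) + 1 := by omega
        rw [hmin, hmin', hlen, List.range'_concat]
        simp [h1, h2]
      · have hmin : min (hi + 1) n - lo = 0 := by omega
        have hmin' : min (hi + 1) (n + 1) - lo = 0 := by omega
        rw [hmin, hmin']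
        simp; omega
    · have : min (hi + 1) n = min (hi + 1) (n + 1) := by omega
      rw [this]
      simp; omega

theorem cond_iff (l1 l2 : List Char) (i : Nat) (hi : i < l1.length)
    (hlen : l1.length = l2.length + 1) :
    (l1.take i ++ l1.drop (i + 1) = l2) ↔
      (l1.length - 1 - pvLcp l1.reverse l2.reverse ≤ i ∧ i ≤ pvLcp l1 l2) := by
  have hsplit : (l1.take i ++ l1.drop (i + 1) = l2) ↔
      (l1.take i = l2.take i ∧ l1.drop (i + 1) = l2.drop i) := by
    constructor
    · intro h
      have hlt : (l1.take i).length = i := by simp; omega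
      constructor
      · have := congrArg (List.take i) h
        rwa [List.take_append_of_le_length (by omega), List.take_take,
          Nat.min_self] at this
      · have := congrArg (List.drop i) h
        rw [List.drop_append_of_le_length (by omega)] at this
        simpa using this
    · rintro ⟨h1, h2⟩
      rw [h1, h2, List.take_append_drop]
  rw [hsplit]
  have hpre : l1.take i = l2.take i ↔ i ≤ pvLcp l1 l2 := by
    constructor
    · intro h; exact le_pvLcp_of_take_eq _ _ _ (by omega) (by omega) h
    · intro h; exact take_eq_of_le_pvLcp _ _ _ h
  have hsuf : l1.drop (i + 1) = l2.drop i ↔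
      l1.length - 1 - i ≤ pvLcp l1.reverse l2.reverse := by
    have hr : l1.drop (i + 1) = l2.drop i ↔
        (l1.drop (i + 1)).reverse = (l2.drop i).reverse := by
      constructor
      · intro h; rw [h]
      · intro h; exact List.reverse_injective h
    rw [hr, List.reverse_drop, List.reverse_drop]
    have e1 : l1.length - (i + 1) = l1.length - 1 - i := by omega
    have e2 : l2.length - i = l1.length - 1 - i := by omega
    rw [e1, e2]
    constructor
    · intro h
      exact le_pvLcp_of_take_eq _ _ _ (by simp; omega) (by simp; omega) h
    · intro h; exact take_eq_of_le_pvLcp _ _ _ h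
  rw [hpre, hsuf]
  constructor <;> intro h <;> exact ⟨by omega, by omega⟩

-- ===== VERDICT (by name: the statement is the Claim_ definition above) =====
theorem indicesToRemove_spec : Claim_equal_indicesToRemove := by
  intro str1 str2 _
  unfold Spec_indicesToRemove indicesToRemove indicesToRemove_alt
  dsimp only
  set l1 := str1.toList with hl1
  set l2 := str2.toList with hl2
  rw [PySem.List.foldl_append_if
    (fun i : Nat => PySem.List.slice l1 none (some (i : Int)) ++ PySem.List.slice l1 (some ((i : Int) + 1)) none == l2)
    (fun i : Nat => (i : Int)) (List.range l1.length) ([] : List Int)]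
  simp only [List.nil_append]
  have hcongr : ∀ i ∈ List.range l1.length,
      (PySem.List.slice l1 none (some (i : Int)) ++ PySem.List.slice l1 (some ((i : Int) + 1)) none == l2)
        = (l1.take i ++ l1.drop (i + 1) == l2) := by
    intro i _
    rw [PySem.List.slice_to l1 (by positivity), PySem.List.slice_from l1 (by positivity)]
    norm_num
  rw [List.filter_congr hcongr]
  by_cases hlen : l1.length = l2.length + 1
  · -- lengths compatible: both sides reduce to the same contiguous range
    have hcond : ∀ i ∈ List.range l1.length,
        (l1.take i ++ l1.drop (i + 1) == l2)
          = decide (l1.length - 1 - pvLcp l1.reverse l2.reverse ≤ i ∧ i ≤ pvLcp l1 l2) := by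
      intro i hmem
      rw [List.mem_range] at hmem
      have := cond_iff l1 l2 i hmem hlen
      rw [Bool.eq_iff_iff]
      simp only [beq_iff_eq, decide_eq_true_eq, this]
    rw [List.filter_congr hcond, filter_range_interval]
    have hp : pvLcp l1 l2 ≤ l2.length := pvLcp_le_right l1 l2
    have hmin : min (pvLcp l1 l2 + 1) l1.length = pvLcp l1 l2 + 1 := by omega
    rw [hmin]
    have hne : ¬(l1.length ≠ l2.length + 1) := by omega
    rw [if_neg hne]
    by_cases hle : l1.length - 1 - pvLcp l1.reverse l2.reverse ≤ pvLcp l1 l2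
    · rw [if_pos hle]
      have hnonempty :
          (List.range' (l1.length - 1 - pvLcp l1.reverse l2.reverse)
            (pvLcp l1 l2 + 1 - (l1.length - 1 - pvLcp l1.reverse l2.reverse))).map
              (fun (i : Nat) => (i : Int)) ≠ [] := by
        simp only [ne_eq, List.map_eq_nil_iff, List.range'_eq_nil_iff]
        omega
      rw [if_neg hnonempty]
    · rw [if_neg hle]
      have hz : pvLcp l1 l2 + 1 - (l1.length - 1 - pvLcp l1.reverse l2.reverse) = 0 := by omega
      rw [hz]
      simp
  · -- length mismatch: no index can work, both sides give [-1]
    have hnone : ∀ i ∈ List.range l1.length,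
        (l1.take i ++ l1.drop (i + 1) == l2) = false := by
      intro i hmem
      rw [List.mem_range] at hmem
      simp only [beq_eq_false_iff_ne, ne_eq]
      intro h
      have := congrArg List.length h
      simp at this
      omega
    rw [List.filter_congr hnone]
    simp [hlen]
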